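-- pv_equiv track=rewrite | github.com/amnasheikh1/atnlp_exam_assignment_3 | Utils.py | create_dictionaries_exp2
-- ===== SOURCE A (Python) =====
-- def create_dictionaries_exp2(data):
--     # Create dictionaries
--     input_length_dict = {}
--     output_length_dict = {}
--
--     for input_command, output_action in data:
--         input_length = len(input_command.split())
--         output_length = len(output_action.split())
--
--         if input_length not in input_length_dict:
--             input_length_dict[input_length] = []
--         input_length_dict[input_length].append((input_command, output_action))
--
--         if output_length not in output_length_dict:
--             output_length_dict[output_length] = []
--         output_length_dict[output_length].append((input_command, output_action))
--
--     return input_length_dict, output_length_dict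
-- ===== SOURCE B (Python) =====
-- def create_dictionaries_exp2(data):
--     # Group via first-occurrence key list + per-key filter, instead of one mutating pass.
--     def group_by(select):
--         lengths = [len(select(pair).split()) for pair in data]
--         return {k: [pair for pair, l in zip(data, lengths) if l == k]
--                 for k in dict.fromkeys(lengths)}
--     return group_by(lambda p: p[0]), group_by(lambda p: p[1])
-- ===== Notes on version B (the rewrite author's own statement) =====
-- stated objective: alternative
-- what changed: B replaces A's single mutating pass that appends into two dicts by a declarative group-by: it computes the token-length of every pair once, takes the distinct lengths in first-occurrence order (dict.fromkeys), and builds each bucket by filtering the data per key.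
import Mathlib
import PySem

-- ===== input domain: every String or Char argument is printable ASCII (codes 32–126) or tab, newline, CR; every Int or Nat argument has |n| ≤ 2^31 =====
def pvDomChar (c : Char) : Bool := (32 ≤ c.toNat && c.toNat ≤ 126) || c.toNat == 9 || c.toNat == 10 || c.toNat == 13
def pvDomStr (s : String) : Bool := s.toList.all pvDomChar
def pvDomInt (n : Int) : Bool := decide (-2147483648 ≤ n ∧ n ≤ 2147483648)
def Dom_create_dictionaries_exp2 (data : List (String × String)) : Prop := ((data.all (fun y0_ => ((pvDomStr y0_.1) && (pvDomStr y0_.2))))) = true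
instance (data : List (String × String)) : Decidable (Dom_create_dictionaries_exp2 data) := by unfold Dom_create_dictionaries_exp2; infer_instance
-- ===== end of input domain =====

-- B groups by first-occurrence key list + per-key filter instead of A's single mutating
-- pass appending into dicts (objective: alternative decomposition, same return value).

-- ===== PORT A =====
-- 'if k not in d: d[k] = []' then 'd[k].append(p)', on one dict
def pvStepA (d : PySem.Dict Int (List (String × String))) (k : Int) (p : String × String) :
    PySem.Dict Int (List (String × String)) :=
  let d' := if d.contains k then d else d.insert k []
  d'.modify k [] (fun xs => xs ++ [p])

def create_dictionaries_exp2 (data : List (String × String)) :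
    (List (Int × List (String × String))) × (List (Int × List (String × String))) :=
  let r := data.foldl
    (fun st p =>
      let il : Int := ((PySem.Str.split₀ p.1).length : Int)
      let ol : Int := ((PySem.Str.split₀ p.2).length : Int)
      (pvStepA st.1 il p, pvStepA st.2 ol p))
    (PySem.Dict.empty, PySem.Dict.empty)
  (r.1.items, r.2.items)

-- ===== PORT B =====
-- lengths = [len(select(pair).split()) for pair in data];
-- {k: [pair for pair, l in zip(data, lengths) if l == k] for k in dict.fromkeys(lengths)}
def pvGroupBy (data : List (String × String)) (select : String × String → String) :
    List (Int × List (String × String)) :=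
  let lengths : List Int := data.map (fun pair => ((PySem.Str.split₀ (select pair)).length : Int))
  (PySem.List.dedup lengths).map (fun k =>
    (k, ((data.zip lengths).filter (fun pl => pl.2 == k)).map (fun pl => pl.1)))

def create_dictionaries_exp2_alt (data : List (String × String)) :
    (List (Int × List (String × String))) × (List (Int × List (String × String))) :=
  (pvGroupBy data (fun p => p.1), pvGroupBy data (fun p => p.2))

-- ===== PRECONDITION & SPEC =====
def Spec_create_dictionaries_exp2 (data : List (String × String)) (out : (List (Int × List (String × String))) × (List (Int × List (String × String)))) : Prop := out = create_dictionaries_exp2_alt data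
instance (data : List (String × String)) (out : (List (Int × List (String × String))) × (List (Int × List (String × String)))) : Decidable (Spec_create_dictionaries_exp2 data out) := by unfold Spec_create_dictionaries_exp2; infer_instance

-- ===== CLAIM (what is proved, stated in full; the proofs are below) =====
def Claim_equal_create_dictionaries_exp2 : Prop := ∀ (data : List (String × String)), Dom_create_dictionaries_exp2 data → Spec_create_dictionaries_exp2 data (create_dictionaries_exp2 data)

-- ===== LEMMAS AND PROOFS =====

-- A's "ensure key, then append" step is extensionally a single modify-with-default-[]
theorem pvStepA_eq_modify (d : PySem.Dict Int (List (String × String))) (k : Int)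
    (p : String × String) : pvStepA d k p = d.modify k [] (fun xs => xs ++ [p]) := by
  unfold pvStepA PySem.Dict.modify
  by_cases h : d.contains k = true
  · simp [h]
  · have h' : d.contains k = false := eq_false_of_ne_true h
    have hg : d.getD k [] = [] := by simp [PySem.Dict.getD_of_not_contains, h']
    simp [h, hg, PySem.Dict.getD_insert_self, PySem.Dict.insert_insert_self]

-- the zip-based bucket comprehension of B is a plain filter
theorem pvZipFilter (data : List (String × String)) (g : String × String → Int) (k : Int) :
    ((data.zip (data.map g)).filter (fun pl => pl.2 == k)).map (fun pl => pl.1)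
      = data.filter (fun p => g p == k) := by
  induction data with
  | nil => rfl
  | cons a l ih => by_cases h : g a == k <;> simp [h, ih]

-- the single grouping loop of A, on one key function, produces exactly B's group-by
theorem pvItemsGroup (data : List (String × String)) (select : String × String → String) :
    (data.foldl
        (fun d p => d.modify ((PySem.Str.split₀ (select p)).length : Int) [] (fun xs => xs ++ [p]))
        PySem.Dict.empty).items = pvGroupBy data select := by
  set key : (String × String) → Int := fun p => ((PySem.Str.split₀ (select p)).length : Int) with hkey
  have hnd : (data.foldl (fun d p => d.modify (key p) [] (fun xs => xs ++ [p]))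
      PySem.Dict.empty).keys.Nodup :=
    PySem.Dict.nodup_keys_foldl_modify_key data key [] (fun _ x => fun xs => xs ++ [x])
      PySem.Dict.empty (by simp [PySem.Dict.keys_empty])
  have hkeys : (data.foldl (fun d p => d.modify (key p) [] (fun xs => xs ++ [p]))
      PySem.Dict.empty).keys = PySem.List.dedup (data.map key) := by
    rw [PySem.Dict.keys_foldl_modify_key data key [] (fun _ x => fun xs => xs ++ [x])]
    simp [PySem.Dict.keys_empty, PySem.List.dedup_eq_ofList, PySem.Set.update, PySem.Set.ofList,
      PySem.Set.empty]
  have hget : ∀ c, (data.foldl (fun d p => d.modify (key p) [] (fun xs => xs ++ [p]))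
      PySem.Dict.empty).getD c [] = data.filter (fun p => key p == c) := by
    intro c
    have h := PySem.Dict.getD_foldl_modify_append (data.map (fun p => (key p, p)))
      PySem.Dict.empty c
    rw [List.foldl_map] at h
    simpa [List.filter_map, List.map_map, Function.comp_def, PySem.Dict.getD_empty] using h
  rw [PySem.Dict.items_eq_map_keys _ hnd [], hkeys]
  unfold pvGroupBy
  simp only [← hkey, hget, pvZipFilter]

-- ===== VERDICT (by name: the statement is the Claim_ definition above) =====
theorem create_dictionaries_exp2_spec : Claim_equal_create_dictionaries_exp2 := by
  intro data _
  unfold Spec_create_dictionaries_exp2 create_dictionaries_exp2 create_dictionaries_exp2_alt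
  simp only [pvStepA_eq_modify]
  have hpair := PySem.List.foldl_prod_mk
    (fun d p => d.modify ((PySem.Str.split₀ p.1).length : Int) [] (fun xs => xs ++ [p]))
    (fun d p => d.modify ((PySem.Str.split₀ p.2).length : Int) [] (fun xs => xs ++ [p]))
    data PySem.Dict.empty PySem.Dict.empty
  simp only [hpair]
  exact congrArg₂ Prod.mk (pvItemsGroup data (fun p => p.1)) (pvItemsGroup data (fun p => p.2))
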